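-- pv_equiv track=rewrite | github.com/emr-tradelab/tradelab-lib-lopezdp-utils | src/tradelab/lopezdp_utils/features/entropy.py | lempel_ziv_lib
-- ===== SOURCE A (Python) =====
-- def lempel_ziv_lib(msg: str) -> list[str]:
--     """Build library of non-redundant substrings using Lempel-Ziv parsing.
--
--     Larger library = higher entropy (less compressible).
--
--     Args:
--         msg: Input message as a string of symbols.
--
--     Returns:
--         List of unique substrings forming the LZ decomposition.
--
--     Reference:
--         AFML Snippet 18.2
--     """
--     # TODO(numba): evaluate JIT for LZ decomposition
--     i = 1
--     lib = [msg[0:1]]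
--     while i < len(msg):
--         for j in range(i, len(msg)):
--             sub = msg[i : j + 1]
--             if sub not in lib:
--                 lib.append(sub)
--                 break
--         i = j + 1
--     return lib
-- ===== SOURCE B (Python) =====
-- def lempel_ziv_lib(msg: str) -> list[str]:
--     """Single linear pass: grow an accumulator char by char; emit it into the
--     library whenever it is new, dropping any leftover tail (as A does)."""
--     lib = [msg[0:1]]
--     sub = ""
--     for ch in msg[1:]:
--         sub += ch
--         if sub not in lib:
--             lib.append(sub)
--             sub = ""
--     return lib
-- ===== Notes on version B (the rewrite author's own statement) =====
-- stated objective: simpler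
-- what changed: Replaced the while-loop with an inner re-slicing for-range scan by a single linear pass over msg[1:] that grows one accumulator string and resets it on each new phrase, eliminating all index arithmetic and repeated slicing.
import Mathlib
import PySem

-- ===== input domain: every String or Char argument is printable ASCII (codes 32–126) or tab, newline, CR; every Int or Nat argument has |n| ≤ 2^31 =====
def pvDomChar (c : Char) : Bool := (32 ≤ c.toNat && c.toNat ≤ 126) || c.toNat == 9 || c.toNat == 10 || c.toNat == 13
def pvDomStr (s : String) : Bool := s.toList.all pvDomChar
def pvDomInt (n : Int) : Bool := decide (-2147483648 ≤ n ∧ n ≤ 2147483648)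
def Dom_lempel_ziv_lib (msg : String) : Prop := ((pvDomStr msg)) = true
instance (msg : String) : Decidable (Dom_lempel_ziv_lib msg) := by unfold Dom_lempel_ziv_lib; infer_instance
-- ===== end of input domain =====

-- B replaces A's while-loop with inner re-slicing range scan by one linear pass
-- growing a single accumulator string; same return value (objective: simpler).

-- ===== PORT A =====
-- inner 'for j in range(i, len(msg))' loop of A: returns (lib, j) as left by the loop
-- (on break: j where the break fired; on normal exhaustion: the last iterated j = len-1).
-- fuel is only a totality guard: called with fuel > len - j it is never exhausted.
def lzInnerA (s : List Char) (lib : List String) (i j : Nat) (fuel : Nat) : List String × Nat :=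
  match fuel with
  | 0 => (lib, j - 1)
  | fuel + 1 =>
    if j < s.length then
      let sub := String.ofList (PySem.List.slice s (some (i : Int)) (some ((j : Int) + 1)))
      if sub ∈ lib then lzInnerA s lib i (j + 1) fuel else (lib ++ [sub], j)
    else (lib, j - 1)

-- outer 'while i < len(msg)' loop of A (fuel > len - i suffices: i strictly increases)
def lzOuterA (s : List Char) (lib : List String) (i : Nat) (fuel : Nat) : List String :=
  match fuel with
  | 0 => lib
  | fuel + 1 =>
    if i < s.length then
      let r := lzInnerA s lib i i (s.length + 1)
      lzOuterA s r.1 (r.2 + 1) fuel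
    else lib

def lempel_ziv_lib (msg : String) : List String :=
  lzOuterA msg.toList [String.ofList (PySem.List.slice msg.toList (some 0) (some 1))] 1
    (msg.toList.length + 1)

-- ===== PORT B =====
-- Source B's single pass: sub accumulates characters; a new phrase is appended and sub reset
def lzGoB (lib : List String) (sub : List Char) : List Char → List String
  | [] => lib
  | c :: rest =>
      let sub' := sub ++ [c]
      if String.ofList sub' ∈ lib then lzGoB lib sub' rest
      else lzGoB (lib ++ [String.ofList sub']) [] rest

def lempel_ziv_lib_alt (msg : String) : List String :=
  lzGoB [String.ofList (msg.toList.take 1)] [] (msg.toList.drop 1)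

-- ===== PRECONDITION & SPEC =====
def Spec_lempel_ziv_lib (msg : String) (out : List String) : Prop := out = lempel_ziv_lib_alt msg
instance (msg : String) (out : List String) : Decidable (Spec_lempel_ziv_lib msg out) := by unfold Spec_lempel_ziv_lib; infer_instance

-- ===== CLAIM (what is proved, stated in full; the proofs are below) =====
def Claim_equal_lempel_ziv_lib : Prop := ∀ (msg : String), Dom_lempel_ziv_lib msg → Spec_lempel_ziv_lib msg (lempel_ziv_lib msg)

-- ===== LEMMAS AND PROOFS =====

-- growing the accumulator by one character = extending the slice by one position
theorem take_snoc (s : List Char) (i j : Nat) (hij : i ≤ j) (hj : j < s.length) :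
    (s.drop i).take (j - i) ++ [s[j]] = (s.drop i).take (j + 1 - i) := by
  have hlen : j - i < (s.drop i).length := by simp; omega
  have : (s.drop i)[j - i] = s[j] := by
    rw [List.getElem_drop]; congr 1; omega
  rw [show j + 1 - i = (j - i) + 1 by omega, List.take_add_one,
      List.getElem?_eq_getElem hlen]
  simp [this]

-- main simulation: B's pass from position j (accumulator = chars i..j-1) computes
-- exactly A's inner scan followed by the rest of A's outer loop
theorem key (k : Nat) : ∀ (s : List Char) (lib : List String) (i : Nat),
    s.length - i < k → lzGoB lib [] (s.drop i) = lzOuterA s lib i k := by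
  induction k with
  | zero => intro s lib i hk; omega
  | succ k ih =>
    intro s lib i hk
    by_cases h : i < s.length
    · rw [lzOuterA]; simp only [h, if_pos]
      have inner : ∀ (m : Nat) (j : Nat) (lib : List String), i ≤ j → s.length - j < m →
          lzGoB lib ((s.drop i).take (j - i)) (s.drop j) =
            lzOuterA s (lzInnerA s lib i j m).1 ((lzInnerA s lib i j m).2 + 1) k := by
        intro m
        induction m with
        | zero => intro j lib hij hm; omega
        | succ m ihm =>
          intro j lib hij hm
          by_cases hj : j < s.length
          · rw [List.drop_eq_getElem_cons hj]
            rw [lzInnerA]; simp only [hj, if_pos]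
            have hslice : PySem.List.slice s (some (i : Int)) (some ((j : Int) + 1))
                = (s.drop i).take (j + 1 - i) := by
              have := PySem.List.slice_natCast s i (j + 1)
              simpa using this
            rw [lzGoB]
            simp only [hslice]
            rw [take_snoc s i j hij hj]
            by_cases hm' : String.ofList ((s.drop i).take (j + 1 - i)) ∈ lib
            · simp only [hm', if_pos]
              exact ihm (j + 1) lib (by omega) (by omega)
            · simp only [hm', if_neg, not_false_iff]
              exact ih s (lib ++ [String.ofList ((s.drop i).take (j + 1 - i))]) (j + 1) (by omega)
          · have hj' : s.length ≤ j := by omega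
            rw [List.drop_eq_nil_of_le hj']
            rw [lzInnerA]; simp only [Nat.not_lt.mpr hj', if_neg, not_false_iff]
            cases k with
            | zero => simp [lzGoB, lzOuterA]
            | succ k =>
              rw [lzOuterA]
              have : ¬ (j - 1 + 1 < s.length) := by omega
              simp [lzGoB, this]
      have := inner (s.length + 1) i lib (le_refl i) (by omega)
      simpa using this
    · rw [lzOuterA]; simp only [h, if_neg, not_false_iff]
      rw [List.drop_eq_nil_of_le (by omega)]
      simp [lzGoB]

-- ===== VERDICT (by name: the statement is the Claim_ definition above) =====
theorem lempel_ziv_lib_spec : Claim_equal_lempel_ziv_lib := by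
  intro msg _
  unfold Spec_lempel_ziv_lib lempel_ziv_lib lempel_ziv_lib_alt
  have hslice : PySem.List.slice msg.toList (some (0 : Int)) (some (1 : Int))
      = msg.toList.take 1 := by
    simpa using PySem.List.slice_natCast msg.toList 0 1
  rw [hslice]
  exact (key (msg.toList.length + 1) msg.toList _ 1 (by omega)).symm
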